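-- pv_equiv track=rewrite | github.com/KiloMusician/ChatDev2 | ecosystem/NuSyQ-Hub/scripts/extract_string_constants.py | suggest_constant_name
-- ===== SOURCE A (Python) =====
-- def suggest_constant_name(string: str) -> str:
--     """Suggest a constant name for a string."""
--     # Remove special characters
--     name = "".join(c if c.isalnum() or c == " " else "_" for c in string)
--
--     # Convert to uppercase snake case
--     words = name.split()
--     if len(words) > 5:
--         words = words[:5]
--
--     name = "_".join(words).upper()
--
--     # Limit length
--     if len(name) > 50:
--         name = name[:50]
--
--     return name
-- ===== SOURCE B (Python) =====
-- def suggest_constant_name(string: str) -> str: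
--     """Suggest a constant name for a string (single-pass tokenizer)."""
--     words = []
--     buf = []
--     for c in string:
--         if c == ' ':
--             if buf:
--                 words.append(''.join(buf))
--                 buf = []
--         else:
--             buf.append(c if c.isalnum() else '_')
--     if buf:
--         words.append(''.join(buf))
--     return '_'.join(words[:5]).upper()[:50]
-- ===== Notes on version B (the rewrite author's own statement) =====
-- stated objective: alternative
-- what changed: Replaced A's clean-the-whole-string-then-split() pipeline by a single tokenizing pass that maintains a current-word buffer and a list of completed words, flushing on spaces; the cap-5/join/upper/truncate tail uses unconditional slices.
import Mathlib
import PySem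

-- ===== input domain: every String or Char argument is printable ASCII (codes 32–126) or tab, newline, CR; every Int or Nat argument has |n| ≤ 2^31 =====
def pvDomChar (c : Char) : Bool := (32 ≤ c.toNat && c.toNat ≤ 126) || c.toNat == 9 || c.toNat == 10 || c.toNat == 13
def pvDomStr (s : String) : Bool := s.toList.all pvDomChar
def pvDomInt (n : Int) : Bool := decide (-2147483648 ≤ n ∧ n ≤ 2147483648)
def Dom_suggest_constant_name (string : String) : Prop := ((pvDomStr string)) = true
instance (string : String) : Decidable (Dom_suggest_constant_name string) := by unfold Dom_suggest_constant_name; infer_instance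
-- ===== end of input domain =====

-- B replaces A's clean-then-resplit pipeline by a single tokenizing pass over the characters (objective: alternative decomposition, same cost).

-- ===== PORT A =====
-- clean (map each char), split(), cap at 5 words, join + upper, cap at 50 chars — step for step
def pvCleanChar (c : Char) : Char :=
  if PySem.Chars.isalnum c || c == ' ' then c else '_'

def suggest_constant_name (string : String) : String :=
  let name := string.toList.map pvCleanChar
  let words := PySem.Chars.split₀ name
  let words := if words.length > 5 then PySem.List.slice words none (some 5) else words
  let name := PySem.Chars.upper (PySem.Chars.join ['_'] words)
  let name := if name.length > 50 then PySem.Chars.slice name none (some 50) else name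
  String.ofList name

-- ===== PORT B =====
-- one pass: state = (completed words, current buffer); a space flushes the buffer
def pvTokStep (st : List (List Char) × List Char) (c : Char) : List (List Char) × List Char :=
  if c == ' ' then
    if st.2.isEmpty then st else (st.1 ++ [st.2], [])
  else
    (st.1, st.2 ++ [if PySem.Chars.isalnum c then c else '_'])

-- Source B's trailing 'if buf: words.append(...)'
def pvFinish (st : List (List Char) × List Char) : List (List Char) :=
  if st.2.isEmpty then st.1 else st.1 ++ [st.2]

def suggest_constant_name_alt (string : String) : String :=
  let words := pvFinish (string.toList.foldl pvTokStep ([], []))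
  String.ofList (PySem.Chars.slice
    (PySem.Chars.upper (PySem.Chars.join ['_'] (PySem.List.slice words none (some 5))))
    none (some 50))

-- ===== PRECONDITION & SPEC =====
def Spec_suggest_constant_name (string : String) (out : String) : Prop := out = suggest_constant_name_alt string
instance (string : String) (out : String) : Decidable (Spec_suggest_constant_name string out) := by unfold Spec_suggest_constant_name; infer_instance

-- ===== CLAIM (what is proved, stated in full; the proofs are below) =====
def Claim_equal_suggest_constant_name : Prop := ∀ (string : String), Dom_suggest_constant_name string → Spec_suggest_constant_name string (suggest_constant_name string)

-- ===== LEMMAS AND PROOFS =====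

-- an alphanumeric character (PySem's reading) is never whitespace
theorem pv_isalnum_not_isspace (c : Char) (h : PySem.Chars.isalnum c = true) :
    PySem.Chars.isspace c = false := by
  have hA : 'A'.val.toNat = 65 := rfl
  have hZ : 'Z'.val.toNat = 90 := rfl
  have ha : 'a'.val.toNat = 97 := rfl
  have hz : 'z'.val.toNat = 122 := rfl
  have h0 : '0'.val.toNat = 48 := rfl
  have h9 : '9'.val.toNat = 57 := rfl
  simp only [PySem.Chars.isalnum, PySem.Chars.isalpha, PySem.Chars.isupper, PySem.Chars.islower,
    PySem.Chars.isdigit, Char.le_def, UInt32.le_iff_toNat_le, Bool.or_eq_true, Bool.and_eq_true,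
    decide_eq_true_eq, hA, hZ, ha, hz, h0, h9] at h
  simp only [PySem.Chars.isspace, Char.toNat, Bool.or_eq_false_iff, decide_eq_false_iff_not,
    Bool.and_eq_false_iff]
  omega

theorem pv_isspace_clean (c : Char) (h : c ≠ ' ') :
    PySem.Chars.isspace (pvCleanChar c) = false := by
  have hc : (c == ' ') = false := by simp [h]
  by_cases ha : PySem.Chars.isalnum c = true
  · simp only [pvCleanChar, ha, Bool.true_or, if_true]
    exact pv_isalnum_not_isspace c ha
  · simp only [pvCleanChar, Bool.not_eq_true] at *
    simp only [ha, hc, Bool.or_self, Bool.false_eq_true, if_false]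
    decide

theorem pvClean_eq_of_ne_space (c : Char) (h : c ≠ ' ') :
    pvCleanChar c = (if PySem.Chars.isalnum c then c else '_') := by
  have hc : (c == ' ') = false := by simp [h]
  simp [pvCleanChar, hc]

-- the one-pass tokenizer computes split() of the cleaned string
theorem pvTok_go (cs : List Char) : ∀ (cur : List Char) (acc : List (List Char)),
    pvFinish (cs.foldl pvTokStep (acc.reverse, cur.reverse))
    = PySem.Chars.split₀.go (cs.map pvCleanChar) cur acc := by
  induction cs with
  | nil =>
    intro cur acc
    simp only [List.foldl_nil, List.map_nil, PySem.Chars.split₀.go, pvFinish,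
      List.isEmpty_reverse]
    by_cases h : cur.isEmpty <;> simp [h, List.reverse_cons]
  | cons c cs ih =>
    intro cur acc
    by_cases hsp : c = ' '
    · subst hsp
      simp only [List.map_cons, show pvCleanChar ' ' = ' ' from rfl, PySem.Chars.split₀.go,
        show PySem.Chars.isspace ' ' = true from rfl, if_pos, List.foldl_cons]
      by_cases h : cur.isEmpty
      · have hcur : cur = [] := by simpa [List.isEmpty_iff] using h
        subst hcur
        rw [if_pos h, show pvTokStep (acc.reverse, List.reverse []) ' ' = (acc.reverse, List.reverse []) from rfl]
        exact ih [] acc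
      · rw [if_neg h,
          show pvTokStep (acc.reverse, cur.reverse) ' ' = ((cur.reverse :: acc).reverse, List.reverse []) from by
            simp [pvTokStep, List.isEmpty_reverse, h, List.reverse_cons]]
        exact ih [] (cur.reverse :: acc)
    · simp only [List.map_cons, PySem.Chars.split₀.go, pv_isspace_clean c hsp,
        Bool.false_eq_true, if_false, List.foldl_cons]
      rw [show pvTokStep (acc.reverse, cur.reverse) c
          = (acc.reverse, ((if PySem.Chars.isalnum c then c else '_') :: cur).reverse) from by
        simp [pvTokStep, show (c == ' ') = false from by simp [hsp], List.reverse_cons]]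
      rw [pvClean_eq_of_ne_space c hsp]
      exact ih ((if PySem.Chars.isalnum c then c else '_') :: cur) acc

-- A's guarded truncation equals the unconditional slice Source B uses
theorem pv_slice_cap {α : Type} (xs : List α) (n : Nat) (k : Int) (hk : k = (n : Int)) :
    (if xs.length > n then PySem.List.slice xs none (some k) else xs)
    = PySem.List.slice xs none (some k) := by
  subst hk
  have hsl : PySem.List.slice xs none (some (n : Int)) = xs.take n := by
    rw [PySem.List.slice_to xs (Int.natCast_nonneg n)]; simp
  by_cases h : xs.length > n
  · simp [h]
  · have hle : xs.length ≤ n := le_of_not_gt h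
    simp [h, hsl, List.take_of_length_le hle]

-- ===== VERDICT (by name: the statement is the Claim_ definition above) =====
theorem suggest_constant_name_spec : Claim_equal_suggest_constant_name := by
  intro s _
  unfold Spec_suggest_constant_name suggest_constant_name suggest_constant_name_alt
  have htok := pvTok_go s.toList [] []
  simp only [List.reverse_nil] at htok
  simp only [PySem.Chars.split₀, ← htok, PySem.Chars.slice]
  rw [pv_slice_cap _ 5 5 (by norm_num), pv_slice_cap _ 50 50 (by norm_num)]
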